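-- pv_equiv track=rewrite | github.com/fawazalrasyid/tubes-tba | FiniteAutomata.py | isSubjek
-- ===== SOURCE A (Python) =====
-- def isSubjek(word: str) -> bool:
--     # Subjek = {aku, ali, ani, dia, dini}
--     currState = 0
--     for letter in word:
--         match currState:
--             case -1: break
--             case 0:
--                 if letter == 'a': currState = 1
--                 elif letter == 'd': currState = 4
--                 else: currState = -1
--             case 1:
--                 if letter == 'k': currState = 2
--                 elif letter == 'l': currState = 5
--                 elif letter == 'n': currState = 6
--                 else: currState = -1
--             case 2: currState = 3 if letter == 'u' else -1
--             case 3: break # FINAL STATE for 'aku'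
--             case 4: currState = 7 if letter == 'i' else -1
--             case 5: currState = 3 if letter == 'i' else -1 # FINAL STATE for 'ali'
--             case 6: currState = 3 if letter == 'i' else -1 # FINAL STATE for 'ani'
--             case 7:
--                 if letter == 'a': currState = 8
--                 elif letter == 'n': currState = 9
--                 else: currState = -1
--             case 8: break # FINAL STATE for 'dia'
--             case 9: currState = 10 if letter == 'i' else -1
--             case 10: break # FINAL STATE for 'dini'
--     return currState in {3, 8, 10}
-- ===== SOURCE B (Python) =====
-- def isSubjek(word: str) -> bool:
--     return word.startswith(("aku", "ali", "ani", "dia", "dini"))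
-- ===== Notes on version B (the rewrite author's own statement) =====
-- stated objective: idiomatic
-- what changed: Replaces the explicit 11-state DFA traversal with a direct library prefix test against the five accepted prefixes.
import Mathlib
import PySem

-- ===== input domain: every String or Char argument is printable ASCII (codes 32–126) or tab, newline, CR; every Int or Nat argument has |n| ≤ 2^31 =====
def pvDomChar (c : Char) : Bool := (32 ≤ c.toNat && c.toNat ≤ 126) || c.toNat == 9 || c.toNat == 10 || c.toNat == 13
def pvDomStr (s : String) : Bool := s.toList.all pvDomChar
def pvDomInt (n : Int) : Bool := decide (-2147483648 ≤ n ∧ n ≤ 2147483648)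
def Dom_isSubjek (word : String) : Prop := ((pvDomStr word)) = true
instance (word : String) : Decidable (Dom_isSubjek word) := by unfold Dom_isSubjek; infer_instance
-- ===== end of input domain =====

-- B replaces A's explicit 11-state DFA traversal by a direct prefix test against the five accepted prefixes (idiomatic).

-- ===== PORT A =====
-- one DFA transition of A's match statement (for the non-breaking states)
def pvStep (s : Int) (letter : Char) : Int :=
  if s = 0 then (if letter = 'a' then 1 else if letter = 'd' then 4 else -1)
  else if s = 1 then (if letter = 'k' then 2 else if letter = 'l' then 5 else if letter = 'n' then 6 else -1)
  else if s = 2 then (if letter = 'u' then 3 else -1)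
  else if s = 4 then (if letter = 'i' then 7 else -1)
  else if s = 5 then (if letter = 'i' then 3 else -1)
  else if s = 6 then (if letter = 'i' then 3 else -1)
  else if s = 7 then (if letter = 'a' then 8 else if letter = 'n' then 9 else -1)
  else if s = 9 then (if letter = 'i' then 10 else -1)
  else s

-- A's for-loop; states -1, 3, 8, 10 `break` out of the loop
def pvLoop (s : Int) (l : List Char) : Int :=
  match l with
  | [] => s
  | c :: rest => if s = -1 ∨ s = 3 ∨ s = 8 ∨ s = 10 then s else pvLoop (pvStep s c) rest

def isSubjek (word : String) : Bool :=
  let currState := pvLoop 0 word.toList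
  currState == 3 || currState == 8 || currState == 10

-- ===== PORT B =====
def isSubjek_alt (word : String) : Bool :=
  PySem.Str.startswith word "aku" || PySem.Str.startswith word "ali" ||
  PySem.Str.startswith word "ani" || PySem.Str.startswith word "dia" ||
  PySem.Str.startswith word "dini"

-- ===== PRECONDITION & SPEC =====
def Spec_isSubjek (word : String) (out : Bool) : Prop := out = isSubjek_alt word
instance (word : String) (out : Bool) : Decidable (Spec_isSubjek word out) := by unfold Spec_isSubjek; infer_instance

-- ===== CLAIM (what is proved, stated in full; the proofs are below) =====
def Claim_equal_isSubjek : Prop := ∀ (word : String), Dom_isSubjek word → Spec_isSubjek word (isSubjek word)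

-- ===== LEMMAS AND PROOFS =====

-- acceptance predicate of A's loop started in state s
def pvAcc (s : Int) (l : List Char) : Prop := pvLoop s l = 3 ∨ pvLoop s l = 8 ∨ pvLoop s l = 10

theorem pvLoop_neg (l : List Char) : pvLoop (-1) l = -1 := by cases l <;> simp [pvLoop]
theorem pvLoop_3 (l : List Char) : pvLoop 3 l = 3 := by cases l <;> simp [pvLoop]
theorem pvLoop_8 (l : List Char) : pvLoop 8 l = 8 := by cases l <;> simp [pvLoop]
theorem pvLoop_10 (l : List Char) : pvLoop 10 l = 10 := by cases l <;> simp [pvLoop]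

theorem pvAcc2 (l : List Char) : pvAcc 2 l ↔ ['u'] <+: l := by
  cases l with
  | nil => simp [pvAcc, pvLoop]
  | cons c r =>
    by_cases h : c = 'u' <;>
      simp [pvAcc, pvLoop, pvStep, h, pvLoop_3, pvLoop_neg, List.cons_prefix_cons, eq_comm]

theorem pvAcc5 (l : List Char) : pvAcc 5 l ↔ ['i'] <+: l := by
  cases l with
  | nil => simp [pvAcc, pvLoop]
  | cons c r =>
    by_cases h : c = 'i' <;>
      simp [pvAcc, pvLoop, pvStep, h, pvLoop_3, pvLoop_neg, List.cons_prefix_cons, eq_comm]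

theorem pvAcc6 (l : List Char) : pvAcc 6 l ↔ ['i'] <+: l := by
  cases l with
  | nil => simp [pvAcc, pvLoop]
  | cons c r =>
    by_cases h : c = 'i' <;>
      simp [pvAcc, pvLoop, pvStep, h, pvLoop_3, pvLoop_neg, List.cons_prefix_cons, eq_comm]

theorem pvAcc9 (l : List Char) : pvAcc 9 l ↔ ['i'] <+: l := by
  cases l with
  | nil => simp [pvAcc, pvLoop]
  | cons c r =>
    by_cases h : c = 'i' <;>
      simp [pvAcc, pvLoop, pvStep, h, pvLoop_10, pvLoop_neg, List.cons_prefix_cons, eq_comm]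

theorem pvAcc1 (l : List Char) :
    pvAcc 1 l ↔ (['k','u'] <+: l ∨ ['l','i'] <+: l ∨ ['n','i'] <+: l) := by
  cases l with
  | nil => simp [pvAcc, pvLoop]
  | cons c r =>
    by_cases hk : c = 'k'
    · simpa [pvAcc, pvLoop, pvStep, hk, List.cons_prefix_cons] using pvAcc2 r
    · by_cases hl : c = 'l'
      · simpa [pvAcc, pvLoop, pvStep, hk, hl, List.cons_prefix_cons] using pvAcc5 r
      · by_cases hn : c = 'n'
        · simpa [pvAcc, pvLoop, pvStep, hk, hl, hn, List.cons_prefix_cons] using pvAcc6 r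
        · simp [pvAcc, pvLoop, pvStep, hk, hl, hn, pvLoop_neg, List.cons_prefix_cons, eq_comm]

theorem pvAcc7 (l : List Char) :
    pvAcc 7 l ↔ (['a'] <+: l ∨ ['n','i'] <+: l) := by
  cases l with
  | nil => simp [pvAcc, pvLoop]
  | cons c r =>
    by_cases ha : c = 'a'
    · simp [pvAcc, pvLoop, pvStep, ha, pvLoop_8, List.cons_prefix_cons]
    · by_cases hn : c = 'n'
      · simpa [pvAcc, pvLoop, pvStep, ha, hn, List.cons_prefix_cons] using pvAcc9 r
      · simp [pvAcc, pvLoop, pvStep, ha, hn, pvLoop_neg, List.cons_prefix_cons, eq_comm]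

theorem pvAcc4 (l : List Char) :
    pvAcc 4 l ↔ (['i','a'] <+: l ∨ ['i','n','i'] <+: l) := by
  cases l with
  | nil => simp [pvAcc, pvLoop]
  | cons c r =>
    by_cases hi : c = 'i'
    · simpa [pvAcc, pvLoop, pvStep, hi, List.cons_prefix_cons] using pvAcc7 r
    · simp [pvAcc, pvLoop, pvStep, hi, pvLoop_neg, List.cons_prefix_cons, eq_comm]

theorem pvA_iff (l : List Char) :
    pvAcc 0 l ↔
      (['a','k','u'] <+: l ∨ ['a','l','i'] <+: l ∨ ['a','n','i'] <+: l ∨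
       ['d','i','a'] <+: l ∨ ['d','i','n','i'] <+: l) := by
  cases l with
  | nil => simp [pvAcc, pvLoop]
  | cons c r =>
    by_cases ha : c = 'a'
    · simpa [pvAcc, pvLoop, pvStep, ha, List.cons_prefix_cons] using pvAcc1 r
    · by_cases hd : c = 'd'
      · simpa [pvAcc, pvLoop, pvStep, ha, hd, List.cons_prefix_cons] using pvAcc4 r
      · simp [pvAcc, pvLoop, pvStep, ha, hd, pvLoop_neg, List.cons_prefix_cons, eq_comm]

-- ===== VERDICT (by name: the statement is the Claim_ definition above) =====
theorem isSubjek_spec : Claim_equal_isSubjek := by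
  intro word _
  unfold Spec_isSubjek isSubjek isSubjek_alt
  have h := pvA_iff word.toList
  unfold pvAcc at h
  simp only [PySem.Str.startswith_eq]
  rw [Bool.eq_iff_iff]
  simp only [Bool.or_eq_true, beq_iff_eq, PySem.Chars.startswith_iff]
  have e1 : "aku".toList = ['a','k','u'] := rfl
  have e2 : "ali".toList = ['a','l','i'] := rfl
  have e3 : "ani".toList = ['a','n','i'] := rfl
  have e4 : "dia".toList = ['d','i','a'] := rfl
  have e5 : "dini".toList = ['d','i','n','i'] := rfl
  rw [e1, e2, e3, e4, e5, or_assoc, or_assoc, or_assoc, or_assoc, h]
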